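-- pv_equiv track=rewrite | github.com/Jh-jaehyuk/Programmers_lv1 | 숫자 짝꿍.py | solution
-- ===== SOURCE A (Python) =====
-- from collections import Counter # count 함수보다 시간복잡도에서 유리함
--
-- def solution(X, Y):
--     answer = ""
--     X = Counter(X)
--     Y = Counter(Y)
--
--     for i in range(9, -1, -1): # 0~9까지 숫자 중에
--         mn = min(X[str(i)], Y[str(i)]) # X, Y 에서 i가 나오는 횟수 중에 작은 횟수
--         answer += str(i) * mn # i * i가 나오는 작은 횟수
--
--     if answer == "":
--         return "-1"
--
--     if answer[0] == "0":
--         return "0"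
--
--     return answer
-- ===== SOURCE B (Python) =====
-- def solution(X, Y):
--     xs = sorted((c for c in X if c.isdigit()), reverse=True)
--     ys = sorted((c for c in Y if c.isdigit()), reverse=True)
--     res = []
--     i = j = 0
--     while i < len(xs) and j < len(ys):
--         if xs[i] == ys[j]:
--             res.append(xs[i])
--             i += 1
--             j += 1
--         elif xs[i] > ys[j]:
--             i += 1
--         else:
--             j += 1
--     if not res:
--         return "-1"
--     if res[0] == "0":
--         return "0"
--     return "".join(res)
-- ===== Notes on version B (the rewrite author's own statement) =====
-- stated objective: alternative
-- what changed: Replaces the per-digit Counter histogram loop (digits 9..0, min of two counts, string repetition) by filtering each string to its digit characters, sorting both descending, and a two-pointer merge that emits each common digit occurrence directly.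
import Mathlib
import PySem

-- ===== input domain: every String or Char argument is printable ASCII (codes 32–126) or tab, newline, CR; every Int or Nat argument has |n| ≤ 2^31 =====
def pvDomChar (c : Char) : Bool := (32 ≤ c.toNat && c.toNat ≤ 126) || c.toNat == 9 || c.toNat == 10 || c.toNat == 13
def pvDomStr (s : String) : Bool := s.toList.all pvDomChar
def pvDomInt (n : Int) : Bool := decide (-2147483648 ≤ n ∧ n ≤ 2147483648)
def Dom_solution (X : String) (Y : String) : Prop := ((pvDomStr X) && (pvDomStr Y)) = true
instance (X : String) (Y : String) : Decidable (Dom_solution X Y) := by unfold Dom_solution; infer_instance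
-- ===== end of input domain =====

-- B: two-pointer merge of the descending-sorted digit characters instead of a per-digit Counter histogram (alternative decomposition, not faster).


-- ===== PORT A =====
-- Counter(X) counts the characters of X as one-character strings; Counter's X[str(i)] lookup is getD _ 0.
def solution (X : String) (Y : String) : String :=
  let xc := PySem.Dict.counter (X.toList.map (fun c => String.ofList [c]))
  let yc := PySem.Dict.counter (Y.toList.map (fun c => String.ofList [c]))
  let answer : List Char :=
    (PySem.List.pyRange 9 (-1) (-1)).foldl
      (fun acc i =>
        let mn := min (xc.getD (PySem.Int.toStr i) 0) (yc.getD (PySem.Int.toStr i) 0)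
        acc ++ PySem.List.pyRepeat (PySem.Int.toStr i).toList mn) []
  match answer with
  | [] => "-1"
  | c :: _ => if c = '0' then "0" else String.ofList answer

-- ===== PORT B =====
-- c.isdigit() for a single printable-ASCII character is exactly '0' ≤ c ≤ '9'.
def isDig (c : Char) : Bool := decide ('0' ≤ c ∧ c ≤ '9')

-- the while-loop over indices i, j of Source B, transcribed as structural recursion on the two suffixes
def mergeDesc : List Char → List Char → List Char
  | [], _ => []
  | _ :: _, [] => []
  | a :: as, b :: bs =>
      if a = b then a :: mergeDesc as bs
      else if a > b then mergeDesc as (b :: bs)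
      else mergeDesc (a :: as) bs

def solution_alt (X : String) (Y : String) : String :=
  let xs := PySem.List.sorted (X.toList.filter isDig) (fun c => c) true
  let ys := PySem.List.sorted (Y.toList.filter isDig) (fun c => c) true
  let res := mergeDesc xs ys
  match res with
  | [] => "-1"
  | c :: _ => if c = '0' then "0" else String.ofList res

-- ===== PRECONDITION & SPEC =====
def Spec_solution (X : String) (Y : String) (out : String) : Prop := out = solution_alt X Y
instance (X : String) (Y : String) (out : String) : Decidable (Spec_solution X Y out) := by unfold Spec_solution; infer_instance

-- ===== CLAIM (what is proved, stated in full; the proofs are below) =====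
def Claim_equal_solution : Prop := ∀ (X : String) (Y : String), Dom_solution X Y → Spec_solution X Y (solution X Y)

-- ===== LEMMAS AND PROOFS =====

-- the ten digit characters, descending
def digitsDesc : List Char := ['9','8','7','6','5','4','3','2','1','0']

-- runs ds f = the concatenation, over c in ds in order, of f c copies of c
def runs (ds : List Char) (f : Char → Nat) : List Char := ds.flatMap (fun c => List.replicate (f c) c)

theorem mem_digitsDesc (x : Char) : x ∈ digitsDesc ↔ isDig x = true := by
  constructor
  · intro h; fin_cases h <;> decide
  · intro h
    have hb : 48 ≤ x.toNat ∧ x.toNat ≤ 57 := by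
      simp [isDig, Char.le_def, UInt32.le_iff_toNat_le] at h; exact h
    have h10 : x.toNat = 48 ∨ x.toNat = 49 ∨ x.toNat = 50 ∨ x.toNat = 51 ∨ x.toNat = 52 ∨
        x.toNat = 53 ∨ x.toNat = 54 ∨ x.toNat = 55 ∨ x.toNat = 56 ∨ x.toNat = 57 := by omega
    rcases h10 with h'|h'|h'|h'|h'|h'|h'|h'|h'|h' <;> (rw [← Char.ofNat_toNat x, h']; decide)

theorem count_runs (ds : List Char) (hnd : ds.Nodup) (f : Char → Nat) (x : Char) :
    (runs ds f).count x = if x ∈ ds then f x else 0 := by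
  induction ds with
  | nil => simp [runs]
  | cons c ds ih =>
    rcases List.nodup_cons.1 hnd with ⟨hc, hnd'⟩
    simp only [runs, List.flatMap_cons, List.count_append] at *
    rw [ih hnd']
    by_cases hx : x = c
    · subst hx; simp [hc]
    · simp [List.count_replicate, hx, Ne.symm hx, List.mem_cons]

theorem filter_perm_runs (l : List Char) :
    (l.filter isDig).Perm (runs digitsDesc (fun c => l.count c)) := by
  rw [List.perm_iff_count]
  intro x
  rw [count_runs _ (by decide)]
  by_cases h : isDig x = true
  · rw [if_pos ((mem_digitsDesc x).2 h), List.count_filter h]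
  · rw [if_neg (fun hm => h ((mem_digitsDesc x).1 hm))]
    exact List.count_eq_zero.2 (fun hm => h (List.of_mem_filter hm))

theorem pairwise_runs (ds : List Char) (h : ds.Pairwise (· > ·)) (f : Char → Nat) :
    (runs ds f).Pairwise (fun a b => b ≤ a) := by
  induction ds with
  | nil => simp [runs]
  | cons c ds ih =>
    rcases List.pairwise_cons.1 h with ⟨hc, h'⟩
    simp only [runs, List.flatMap_cons]
    rw [List.pairwise_append]
    refine ⟨List.pairwise_replicate.2 (Or.inr le_rfl), ih h', ?_⟩
    intro a ha b hb
    rw [List.eq_of_mem_replicate ha]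
    rcases List.mem_flatMap.1 hb with ⟨d, hd, hbd⟩
    rw [List.eq_of_mem_replicate hbd]
    exact le_of_lt (hc d hd)

theorem sorted_filter_eq_runs (l : List Char) :
    PySem.List.sorted (l.filter isDig) (fun c => c) true = runs digitsDesc (fun c => l.count c) := by
  refine List.Perm.eq_of_pairwise (le := fun a b => b ≤ a)
    (fun a b _ _ h1 h2 => le_antisymm h2 h1) ?_ ?_
    ((PySem.List.sorted_perm _ _ _).trans (filter_perm_runs l))
  · exact PySem.List.sorted_pairwise_rev (xs := l.filter isDig) (key := fun c => c)
  · exact pairwise_runs digitsDesc (by decide) _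

theorem mergeDesc_nil_right (A : List Char) : mergeDesc A [] = [] := by
  cases A <;> simp [mergeDesc]

theorem mergeDesc_drop_right (a : Char) (A B : List Char) (hA : ∀ x ∈ A, x < a) (n : Nat) :
    mergeDesc A (List.replicate n a ++ B) = mergeDesc A B := by
  induction n with
  | zero => rfl
  | succ n ih =>
    cases A with
    | nil => simp [mergeDesc]
    | cons x A' =>
      have hx := hA x (by simp)
      rw [List.replicate_succ, List.cons_append]
      show mergeDesc (x :: A') (a :: (List.replicate n a ++ B)) = _
      rw [mergeDesc, if_neg (by intro h; subst h; exact lt_irrefl x hx),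
          if_neg (not_lt.2 (le_of_lt hx))]
      exact ih

theorem mergeDesc_drop_left (a : Char) (A B : List Char) (hB : ∀ x ∈ B, x < a) (m : Nat) :
    mergeDesc (List.replicate m a ++ A) B = mergeDesc A B := by
  induction m with
  | zero => rfl
  | succ m ih =>
    cases B with
    | nil => rw [mergeDesc_nil_right, mergeDesc_nil_right]
    | cons b B' =>
      have hb := hB b (by simp)
      rw [List.replicate_succ, List.cons_append]
      show mergeDesc (a :: (List.replicate m a ++ A)) (b :: B') = _
      rw [mergeDesc, if_neg (by intro h; rw [h] at hb; exact lt_irrefl b hb), if_pos hb]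
      exact ih

theorem mergeDesc_rep (a : Char) (A B : List Char) (hA : ∀ x ∈ A, x < a) (hB : ∀ x ∈ B, x < a) :
    ∀ m n, mergeDesc (List.replicate m a ++ A) (List.replicate n a ++ B)
      = List.replicate (min m n) a ++ mergeDesc A B := by
  intro m
  induction m with
  | zero => intro n; simpa using mergeDesc_drop_right a A B hA n
  | succ m ih =>
    intro n
    cases n with
    | zero => simpa using mergeDesc_drop_left a A B hB (m+1)
    | succ n =>
      rw [List.replicate_succ, List.replicate_succ, List.cons_append, List.cons_append,
          mergeDesc, if_pos rfl, ih n, Nat.succ_min_succ, List.replicate_succ, List.cons_append]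

theorem merge_runs (ds : List Char) (h : ds.Pairwise (· > ·)) (f g : Char → Nat) :
    mergeDesc (runs ds f) (runs ds g) = runs ds (fun c => min (f c) (g c)) := by
  induction ds with
  | nil => simp [runs, mergeDesc]
  | cons c ds ih =>
    rcases List.pairwise_cons.1 h with ⟨hc, h'⟩
    have hmem : ∀ (f : Char → Nat) x, x ∈ runs ds f → x < c := by
      intro f x hx
      rcases List.mem_flatMap.1 hx with ⟨d, hd, hxd⟩
      rw [List.eq_of_mem_replicate hxd]
      exact hc d hd
    have e : ∀ f : Char → Nat, runs (c :: ds) f = List.replicate (f c) c ++ runs ds f :=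
      fun f => by simp [runs]
    rw [e f, e g, e (fun c => min (f c) (g c)), mergeDesc_rep c _ _ (hmem f) (hmem g), ih h']

theorem inj_single : Function.Injective (fun c : Char => String.ofList [c]) := by
  intro a b h
  simpa using congrArg String.toList h

theorem digit_term (l1 l2 : List Char) (i : Int) (c : Char)
    (h : PySem.Int.toStr i = String.ofList [c]) :
    PySem.List.pyRepeat (PySem.Int.toStr i).toList
      (min ((PySem.Dict.counter (l1.map (fun c => String.ofList [c]))).getD (PySem.Int.toStr i) 0)
           ((PySem.Dict.counter (l2.map (fun c => String.ofList [c]))).getD (PySem.Int.toStr i) 0))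
    = List.replicate (min (l1.count c) (l2.count c)) c := by
  rw [h, PySem.Dict.getD_counter, PySem.Dict.getD_counter,
      List.count_map_of_injective _ _ inj_single, List.count_map_of_injective _ _ inj_single,
      ← Nat.cast_min]
  simp only [PySem.List.pyRepeat_singleton, String.toList_ofList]
  congr 1

theorem listA_eq_canon (l1 l2 : List Char) :
    (PySem.List.pyRange 9 (-1) (-1)).foldl
      (fun acc i =>
        let mn := min ((PySem.Dict.counter (l1.map (fun c => String.ofList [c]))).getD (PySem.Int.toStr i) 0)
                      ((PySem.Dict.counter (l2.map (fun c => String.ofList [c]))).getD (PySem.Int.toStr i) 0)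
        acc ++ PySem.List.pyRepeat (PySem.Int.toStr i).toList mn) []
    = runs digitsDesc (fun c => min (l1.count c) (l2.count c)) := by
  rw [show PySem.List.pyRange 9 (-1) (-1) = [(9:Int),8,7,6,5,4,3,2,1,0] from by decide]
  simp only [List.foldl_cons, List.foldl_nil]
  rw [digit_term l1 l2 9 '9' (by decide), digit_term l1 l2 8 '8' (by decide),
      digit_term l1 l2 7 '7' (by decide), digit_term l1 l2 6 '6' (by decide),
      digit_term l1 l2 5 '5' (by decide), digit_term l1 l2 4 '4' (by decide),
      digit_term l1 l2 3 '3' (by decide), digit_term l1 l2 2 '2' (by decide),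
      digit_term l1 l2 1 '1' (by decide), digit_term l1 l2 0 '0' (by decide)]
  simp [runs, digitsDesc, List.flatMap_cons]

-- ===== VERDICT (by name: the statement is the Claim_ definition above) =====
theorem solution_spec : Claim_equal_solution := by
  intro X Y _
  unfold Spec_solution solution solution_alt
  simp only []
  rw [listA_eq_canon, sorted_filter_eq_runs, sorted_filter_eq_runs,
      merge_runs digitsDesc (by decide)]
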